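-- pv_equiv track=rewrite | github.com/leonsolon/coding-challenges | codility/lesson06/triangle/felippe_3.py | solution
-- ===== SOURCE A (Python) =====
-- def solution(A):
--   B = list(filter(lambda element: element >= 0, A)) # filtrando os valores negativos de forma mais eficiente
--   if len(B) < 3:
--     return 0
--   B = sorted(B)
--   triangle = 0
--   for i in reversed(range(2, len(B))):
--     if B[i] + B[i-1] > B[i-2] and B[i-2] + B[i-1] > B[i] and B[i] + B[i-2] > B[i-1]:
--       triangle = 1
--   return triangle
-- ===== SOURCE B (Python) =====
-- def solution(A):
--     B = [e for e in A if e >= 0]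
--     n = len(B)
--     if n < 3:
--         return 0
--     for i in range(n):
--         for j in range(i + 1, n):
--             for k in range(j + 1, n):
--                 p, q, r = B[i], B[j], B[k]
--                 if p + q > r and q + r > p and p + r > q:
--                     return 1
--     return 0
-- ===== Notes on version B (the rewrite author's own statement) =====
-- stated objective: alternative
-- what changed: B replaces A's sort-then-scan-of-consecutive-triples with a direct brute-force scan over all index triples of the filtered list, returning 1 on the first triangle triple found.
import Mathlib
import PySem

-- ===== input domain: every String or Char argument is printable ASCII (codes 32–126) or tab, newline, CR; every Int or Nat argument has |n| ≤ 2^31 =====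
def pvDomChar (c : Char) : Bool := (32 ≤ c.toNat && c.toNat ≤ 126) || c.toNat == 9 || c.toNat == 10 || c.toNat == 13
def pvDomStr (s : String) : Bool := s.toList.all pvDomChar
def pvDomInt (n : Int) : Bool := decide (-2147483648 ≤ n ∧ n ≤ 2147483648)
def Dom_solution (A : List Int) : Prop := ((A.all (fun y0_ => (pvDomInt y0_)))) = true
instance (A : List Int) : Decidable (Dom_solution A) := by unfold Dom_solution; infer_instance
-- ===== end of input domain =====

-- B is an alternative algorithm: brute force over all index triples instead of A's sort + consecutive-triple scan.

-- ===== PORT A =====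
def solution (A : List Int) : Int :=
  let B := A.filter (fun element => decide (0 ≤ element))
  if B.length < 3 then 0
  else
    let B2 := PySem.List.sorted B (fun x => x) false
    (PySem.List.pyRange 2 (B2.length : Int) 1).reverse.foldl
      (fun triangle i =>
        if PySem.List.pyGetD B2 i 0 + PySem.List.pyGetD B2 (i-1) 0 > PySem.List.pyGetD B2 (i-2) 0
           ∧ PySem.List.pyGetD B2 (i-2) 0 + PySem.List.pyGetD B2 (i-1) 0 > PySem.List.pyGetD B2 i 0
           ∧ PySem.List.pyGetD B2 i 0 + PySem.List.pyGetD B2 (i-2) 0 > PySem.List.pyGetD B2 (i-1) 0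
         then 1 else triangle) 0

-- ===== PORT B =====
def solution_alt (A : List Int) : Int :=
  let B := A.filter (fun e => decide (0 ≤ e))
  let n : Int := B.length
  if n < 3 then 0
  else if (PySem.List.pyRange 0 n 1).any (fun i =>
            (PySem.List.pyRange (i+1) n 1).any (fun j =>
              (PySem.List.pyRange (j+1) n 1).any (fun k =>
                let p := PySem.List.pyGetD B i 0
                let q := PySem.List.pyGetD B j 0
                let r := PySem.List.pyGetD B k 0
                decide (p + q > r ∧ q + r > p ∧ p + r > q))))
       then 1 else 0

-- ===== PRECONDITION & SPEC =====
def Spec_solution (A : List Int) (out : Int) : Prop := out = solution_alt A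
instance (A : List Int) (out : Int) : Decidable (Spec_solution A out) := by unfold Spec_solution; infer_instance

-- ===== CLAIM (what is proved, stated in full; the proofs are below) =====
def Claim_equal_solution : Prop := ∀ (A : List Int), Dom_solution A → Spec_solution A (solution A)

-- ===== LEMMAS AND PROOFS =====

-- "some three elements of l (as a sub-multiset) form a triangle"
def TriEx (l : List Int) : Prop :=
  ∃ x y z : Int, List.Subperm [x, y, z] l ∧ x + y > z ∧ y + z > x ∧ x + z > y

-- the loop of A only ever raises the flag to 1
theorem foldl_flag (p : Int → Prop) [DecidablePred p] :
    ∀ (l : List Int) (acc : Int),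
      l.foldl (fun t i => if p i then 1 else t) acc = if ∃ i ∈ l, p i then 1 else acc := by
  intro l
  induction l with
  | nil => intro acc; simp
  | cons x t ih =>
    intro acc
    rw [List.foldl_cons, ih]
    by_cases ht : ∃ i ∈ t, p i
    · rw [if_pos ht,
        if_pos ⟨ht.choose, List.mem_cons_of_mem x ht.choose_spec.1, ht.choose_spec.2⟩]
    · rw [if_neg ht]
      by_cases hx : p x
      · rw [if_pos hx, if_pos ⟨x, List.mem_cons_self, hx⟩]
      · rw [if_neg hx, if_neg (by
          rintro ⟨i, hi, hp⟩
          rcases List.mem_cons.1 hi with rfl | hi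
          · exact hx hp
          · exact ht ⟨i, hi, hp⟩)]

-- a pair at increasing indices is a sublist
theorem sub2_of_idx {α : Type} (l : List α) (j k : Nat) (hjk : j < k) (hk : k < l.length) :
    List.Sublist [l[j]'(by omega), l[k]] l := by
  have hdrop : l.drop j = l[j]'(by omega) :: l.drop (j+1) := List.drop_eq_getElem_cons (by omega)
  have hmem : l[k] ∈ l.drop (j+1) := by
    have hlen : k - (j+1) < (l.drop (j+1)).length := by simp [List.length_drop]; omega
    have he : (l.drop (j+1))[k - (j+1)] = l[k] := by
      rw [List.getElem_drop]; congr 1; omega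
    exact he ▸ List.getElem_mem hlen
  have h2 : List.Sublist [l[j]'(by omega), l[k]] (l.drop j) := by
    rw [hdrop]
    exact List.Sublist.cons₂ _ (List.singleton_sublist.2 hmem)
  exact h2.trans (List.drop_sublist _ _)

-- a triple at increasing indices is a sublist
theorem sub3_of_idx {α : Type} (l : List α) (i j k : Nat) (hij : i < j) (hjk : j < k)
    (hk : k < l.length) :
    List.Sublist [l[i]'(by omega), l[j]'(by omega), l[k]] l := by
  have hdrop : l.drop i = l[i]'(by omega) :: l.drop (i+1) := List.drop_eq_getElem_cons (by omega)
  have hj' : j - (i+1) < (l.drop (i+1)).length := by simp [List.length_drop]; omega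
  have hk' : k - (i+1) < (l.drop (i+1)).length := by simp [List.length_drop]; omega
  have hpair : List.Sublist [(l.drop (i+1))[j - (i+1)], (l.drop (i+1))[k - (i+1)]] (l.drop (i+1)) :=
    sub2_of_idx _ _ _ (by omega) hk'
  have ej : (l.drop (i+1))[j - (i+1)] = l[j]'(by omega) := by
    rw [List.getElem_drop]; congr 1; omega
  have ek : (l.drop (i+1))[k - (i+1)] = l[k] := by
    rw [List.getElem_drop]; congr 1; omega
  rw [ej, ek] at hpair
  have h3 : List.Sublist [l[i]'(by omega), l[j]'(by omega), l[k]] (l.drop i) := by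
    rw [hdrop]; exact List.Sublist.cons₂ _ hpair
  exact h3.trans (List.drop_sublist _ _)

-- converse: a 2-element sublist sits at increasing indices
theorem sub2_idx {α : Type} {b c : α} :
    ∀ {l : List α}, List.Sublist [b, c] l →
      ∃ j k : Nat, j < k ∧ l[j]? = some b ∧ l[k]? = some c := by
  intro l
  induction l with
  | nil => intro h; simp at h
  | cons x t ih =>
    intro h
    cases h with
    | cons _ h' =>
      obtain ⟨j, k, hjk, hb, hc⟩ := ih h'
      exact ⟨j+1, k+1, by omega, by simpa using hb, by simpa using hc⟩
    | cons₂ _ h' =>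
      have hc : c ∈ t := List.singleton_sublist.1 h'
      obtain ⟨m, hm, he⟩ := List.getElem_of_mem hc
      exact ⟨0, m+1, by omega, by simp, by simp [List.getElem?_eq_getElem hm, he]⟩

-- converse: a 3-element sublist sits at increasing indices
theorem sub3_idx {α : Type} {a b c : α} :
    ∀ {l : List α}, List.Sublist [a, b, c] l →
      ∃ i j k : Nat, i < j ∧ j < k ∧ l[i]? = some a ∧ l[j]? = some b ∧ l[k]? = some c := by
  intro l
  induction l with
  | nil => intro h; simp at h
  | cons x t ih =>
    intro h
    cases h with
    | cons _ h' =>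
      obtain ⟨i, j, k, hij, hjk, ha, hb, hc⟩ := ih h'
      exact ⟨i+1, j+1, k+1, by omega, by omega, by simpa using ha, by simpa using hb,
        by simpa using hc⟩
    | cons₂ _ h' =>
      obtain ⟨j, k, hjk, hb, hc⟩ := sub2_idx h'
      exact ⟨0, j+1, k+1, by omega, by omega, by simp, by simpa using hb, by simpa using hc⟩

-- triangle condition transfers along a permutation of the three values
theorem tri_perm {a b c x y z : Int} (h : [a, b, c].Perm [x, y, z])
    (ht : x + y > z ∧ y + z > x ∧ x + z > y) :
    a + b > c ∧ b + c > a ∧ a + c > b := by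
  have hsum : a + (b + c) = x + (y + z) := by simpa using h.sum_eq
  have ha : a = x ∨ a = y ∨ a = z := by
    have := h.mem_iff (a := a); simp at this; tauto
  have hb : b = x ∨ b = y ∨ b = z := by
    have := h.mem_iff (a := b); simp at this; tauto
  have hc : c = x ∨ c = y ∨ c = z := by
    have := h.mem_iff (a := c); simp at this; tauto
  obtain ⟨h1, h2, h3⟩ := ht
  rcases ha with rfl | rfl | rfl <;> rcases hb with rfl | rfl | rfl <;>
    rcases hc with rfl | rfl | rfl <;> omega

-- B's nested index scan finds a triangle iff some sub-multiset triple is a triangle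
theorem lemmaB (C : List Int) :
    ((∃ i ∈ PySem.List.pyRange 0 (C.length : Int) 1,
      ∃ j ∈ PySem.List.pyRange (i+1) (C.length : Int) 1,
      ∃ k ∈ PySem.List.pyRange (j+1) (C.length : Int) 1,
        PySem.List.pyGetD C i 0 + PySem.List.pyGetD C j 0 > PySem.List.pyGetD C k 0 ∧
        PySem.List.pyGetD C j 0 + PySem.List.pyGetD C k 0 > PySem.List.pyGetD C i 0 ∧
        PySem.List.pyGetD C i 0 + PySem.List.pyGetD C k 0 > PySem.List.pyGetD C j 0)
      ↔ TriEx C) := by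
  constructor
  · rintro ⟨i, hi, j, hj, k, hk, hcond⟩
    rw [PySem.List.mem_pyRange_one] at hi hj hk
    have hkn : k.toNat < C.length := by omega
    rw [PySem.List.pyGetD_eq_getElem C 0 (by omega) hi.2,
        PySem.List.pyGetD_eq_getElem C 0 (by omega) hj.2,
        PySem.List.pyGetD_eq_getElem C 0 (by omega) hk.2] at hcond
    exact ⟨C[i.toNat]'(by omega), C[j.toNat]'(by omega), C[k.toNat],
      (sub3_of_idx C i.toNat j.toNat k.toNat (by omega) (by omega) hkn).subperm,
      hcond.1, hcond.2.1, hcond.2.2⟩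
  · rintro ⟨x, y, z, ⟨l', hperm, hsl⟩, ht⟩
    have hlen : l'.length = 3 := by simpa using hperm.length_eq
    match l', hlen, hperm, hsl with
    | [a, b, c], _, hperm, hsl =>
      have htabc : a + b > c ∧ b + c > a ∧ a + c > b := tri_perm hperm ⟨ht.1, ht.2.1, ht.2.2⟩
      obtain ⟨i, j, k, hij, hjk, ha, hb, hc⟩ := sub3_idx hsl
      have hk : k < C.length := (List.getElem?_eq_some_iff.1 hc).1
      have ea : C[i]'(by omega) = a := (List.getElem?_eq_some_iff.1 ha).2
      have eb : C[j]'(by omega) = b := (List.getElem?_eq_some_iff.1 hb).2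
      have ec : C[k] = c := (List.getElem?_eq_some_iff.1 hc).2
      refine ⟨(i : Int), ?_, (j : Int), ?_, (k : Int), ?_, ?_⟩
      · rw [PySem.List.mem_pyRange_one]; exact ⟨by omega, by exact_mod_cast (by omega : i < C.length)⟩
      · rw [PySem.List.mem_pyRange_one]; exact ⟨by omega, by exact_mod_cast (by omega : j < C.length)⟩
      · rw [PySem.List.mem_pyRange_one]; exact ⟨by omega, by exact_mod_cast hk⟩
      · rw [PySem.List.pyGetD_eq_getElem C 0 (by omega) (by exact_mod_cast (by omega : i < C.length)),
            PySem.List.pyGetD_eq_getElem C 0 (by omega) (by exact_mod_cast (by omega : j < C.length)),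
            PySem.List.pyGetD_eq_getElem C 0 (by omega) (by exact_mod_cast hk)]
        simp only [Int.toNat_natCast]
        rw [ea, eb, ec]
        exact htabc

-- A's consecutive scan over the sorted list finds a triangle iff some sub-multiset triple is one
theorem lemmaA (S : List Int) (hs : S.Pairwise (· ≤ ·)) (hnn : ∀ x ∈ S, 0 ≤ x) :
    ((∃ i ∈ PySem.List.pyRange 2 (S.length : Int) 1,
        PySem.List.pyGetD S i 0 + PySem.List.pyGetD S (i-1) 0 > PySem.List.pyGetD S (i-2) 0 ∧
        PySem.List.pyGetD S (i-2) 0 + PySem.List.pyGetD S (i-1) 0 > PySem.List.pyGetD S i 0 ∧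
        PySem.List.pyGetD S i 0 + PySem.List.pyGetD S (i-2) 0 > PySem.List.pyGetD S (i-1) 0)
      ↔ TriEx S) := by
  have hmono : ∀ (p q : Nat) (hpq : p ≤ q) (hq : q < S.length), S[p]'(by omega) ≤ S[q] := by
    intro p q hpq hq
    rcases Nat.eq_or_lt_of_le hpq with rfl | hlt
    · exact le_refl _
    · exact List.pairwise_iff_getElem.1 hs p q (by omega) hq hlt
  constructor
  · rintro ⟨i, hi, hcond⟩
    rw [PySem.List.mem_pyRange_one] at hi
    have hiu : i.toNat < S.length := by omega
    rw [PySem.List.pyGetD_eq_getElem S 0 (by omega) hi.2,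
        PySem.List.pyGetD_eq_getElem S 0 (by omega) (by omega),
        PySem.List.pyGetD_eq_getElem S 0 (by omega) (by omega)] at hcond
    have e1 : (i-1).toNat = i.toNat - 1 := by omega
    have e2 : (i-2).toNat = i.toNat - 2 := by omega
    simp only [e1, e2] at hcond
    refine ⟨S[i.toNat - 2]'(by omega), S[i.toNat - 1]'(by omega), S[i.toNat],
      (sub3_of_idx S (i.toNat - 2) (i.toNat - 1) i.toNat (by omega) (by omega) hiu).subperm,
      hcond.2.1, by omega, by omega⟩
  · rintro ⟨x, y, z, ⟨l', hperm, hsl⟩, ht⟩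
    have hlen : l'.length = 3 := by simpa using hperm.length_eq
    match l', hlen, hperm, hsl with
    | [a, b, c], _, hperm, hsl =>
      have htabc : a + b > c ∧ b + c > a ∧ a + c > b := tri_perm hperm ⟨ht.1, ht.2.1, ht.2.2⟩
      obtain ⟨i, j, k, hij, hjk, ha, hb, hc⟩ := sub3_idx hsl
      have hk : k < S.length := (List.getElem?_eq_some_iff.1 hc).1
      have ea : S[i]'(by omega) = a := (List.getElem?_eq_some_iff.1 ha).2
      have eb : S[j]'(by omega) = b := (List.getElem?_eq_some_iff.1 hb).2
      have ec : S[k] = c := (List.getElem?_eq_some_iff.1 hc).2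
      -- the two slots just below k dominate a and b, so the consecutive triple at k works
      have h1 : S[i]'(by omega) ≤ S[k-2]'(by omega) := hmono i (k-2) (by omega) (by omega)
      have h2 : S[j]'(by omega) ≤ S[k-1]'(by omega) := hmono j (k-1) (by omega) (by omega)
      have h3 : S[k-2]'(by omega) ≤ S[k-1]'(by omega) := hmono (k-2) (k-1) (by omega) (by omega)
      have h4 : S[k-1]'(by omega) ≤ S[k] := hmono (k-1) k (by omega) hk
      have h0 : 0 ≤ S[k-2]'(by omega) := hnn _ (List.getElem_mem (by omega))
      refine ⟨(k : Int), ?_, ?_⟩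
      · rw [PySem.List.mem_pyRange_one]; exact ⟨by omega, by exact_mod_cast hk⟩
      · rw [PySem.List.pyGetD_eq_getElem S 0 (by omega) (by exact_mod_cast hk),
            PySem.List.pyGetD_eq_getElem S 0 (by omega) (by omega),
            PySem.List.pyGetD_eq_getElem S 0 (by omega) (by omega)]
        have e1 : ((k : Int) - 1).toNat = k - 1 := by omega
        have e2 : ((k : Int) - 2).toNat = k - 2 := by omega
        simp only [Int.toNat_natCast, e1, e2]
        rw [ea] at h1; rw [eb] at h2
        omega

-- ===== VERDICT (by name: the statement is the Claim_ definition above) =====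
theorem solution_spec : Claim_equal_solution := by
  intro A _
  unfold Spec_solution solution solution_alt
  set C := A.filter (fun e => decide (0 ≤ e)) with hC
  by_cases hlen : C.length < 3
  · rw [if_pos hlen, if_pos (show (C.length : Int) < 3 by exact_mod_cast hlen)]
  · rw [if_neg hlen, if_neg (show ¬ ((C.length : Int) < 3) by exact_mod_cast hlen)]
    set S := PySem.List.sorted C (fun x => x) false with hS
    have hperm : S.Perm C := PySem.List.sorted_perm C (fun x => x) false
    have hsorted : S.Pairwise (· ≤ ·) := by
      simpa using PySem.List.sorted_pairwise C (fun x => x)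
    have hnn : ∀ x ∈ S, 0 ≤ x := by
      intro x hx
      have hx' : x ∈ C := (hperm.mem_iff).1 hx
      have := List.mem_filter.1 hx'
      simpa using this.2
    have hTS : TriEx S ↔ TriEx C := by
      constructor
      · rintro ⟨x, y, z, hsub, ht⟩; exact ⟨x, y, z, (hperm.subperm_left).1 hsub, ht⟩
      · rintro ⟨x, y, z, hsub, ht⟩; exact ⟨x, y, z, (hperm.subperm_left).2 hsub, ht⟩
    rw [foldl_flag (fun i =>
        PySem.List.pyGetD S i 0 + PySem.List.pyGetD S (i-1) 0 > PySem.List.pyGetD S (i-2) 0 ∧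
        PySem.List.pyGetD S (i-2) 0 + PySem.List.pyGetD S (i-1) 0 > PySem.List.pyGetD S i 0 ∧
        PySem.List.pyGetD S i 0 + PySem.List.pyGetD S (i-2) 0 > PySem.List.pyGetD S (i-1) 0)]
    have hEA : (∃ i ∈ (PySem.List.pyRange 2 (S.length : Int) 1).reverse,
        PySem.List.pyGetD S i 0 + PySem.List.pyGetD S (i-1) 0 > PySem.List.pyGetD S (i-2) 0 ∧
        PySem.List.pyGetD S (i-2) 0 + PySem.List.pyGetD S (i-1) 0 > PySem.List.pyGetD S i 0 ∧
        PySem.List.pyGetD S i 0 + PySem.List.pyGetD S (i-2) 0 > PySem.List.pyGetD S (i-1) 0)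
        ↔ TriEx C := by
      rw [← hTS, ← lemmaA S hsorted hnn]
      constructor
      · rintro ⟨i, hi, hc⟩; exact ⟨i, List.mem_reverse.1 hi, hc⟩
      · rintro ⟨i, hi, hc⟩; exact ⟨i, List.mem_reverse.2 hi, hc⟩
    have hEB : ((PySem.List.pyRange 0 (C.length : Int) 1).any (fun i =>
            (PySem.List.pyRange (i+1) (C.length : Int) 1).any (fun j =>
              (PySem.List.pyRange (j+1) (C.length : Int) 1).any (fun k =>
                let p := PySem.List.pyGetD C i 0
                let q := PySem.List.pyGetD C j 0
                let r := PySem.List.pyGetD C k 0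
                decide (p + q > r ∧ q + r > p ∧ p + r > q)))) = true)
        ↔ TriEx C := by
      rw [← lemmaB C]
      simp [List.any_eq_true]
    by_cases hT : TriEx C
    · rw [if_pos (hEA.2 hT), if_pos (hEB.2 hT)]
    · rw [if_neg (fun h => hT (hEA.1 h)), if_neg (fun h => hT (hEB.1 h))]
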